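-- pv_equiv track=rewrite | github.com/NattKh/CrimsonDesertModdingTools | parsers/characterinfo_parser.py | compute_entry_sizes
-- ===== SOURCE A (Python) =====
-- from typing import Dict, Tuple
--
-- def compute_entry_sizes(offsets: Dict[int, int],
--                         pabgb_size: int) -> Dict[int, int]:
--     """Compute each entry's byte length from the sorted offset list."""
--     sorted_items = sorted(offsets.items(), key=lambda kv: kv[1])
--     sizes: Dict[int, int] = {}
--     for i, (key, off) in enumerate(sorted_items):
--         if i + 1 < len(sorted_items):
--             sizes[key] = sorted_items[i + 1][1] - off
--         else:
--             sizes[key] = pabgb_size - off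
--     return sizes
-- ===== SOURCE B (Python) =====
-- def compute_entry_sizes(offsets, pabgb_size):
--     """Compute each entry's byte length from the sorted offset list."""
--     sorted_items = sorted(offsets.items(), key=lambda kv: kv[1])
--     boundary = pabgb_size
--     pairs = []
--     for key, off in reversed(sorted_items):
--         pairs.append((key, boundary - off))
--         boundary = off
--     pairs.reverse()
--     return dict(pairs)
-- ===== Notes on version B (the rewrite author's own statement) =====
-- stated objective: alternative
-- what changed: B replaces A's enumerate-and-index-ahead loop (sizes[key] = sorted_items[i+1][1] - off with a length test) by a single reverse traversal that threads a running 'boundary' value backwards, starting at pabgb_size, so no indexing and no length comparison remain.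
import Mathlib
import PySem

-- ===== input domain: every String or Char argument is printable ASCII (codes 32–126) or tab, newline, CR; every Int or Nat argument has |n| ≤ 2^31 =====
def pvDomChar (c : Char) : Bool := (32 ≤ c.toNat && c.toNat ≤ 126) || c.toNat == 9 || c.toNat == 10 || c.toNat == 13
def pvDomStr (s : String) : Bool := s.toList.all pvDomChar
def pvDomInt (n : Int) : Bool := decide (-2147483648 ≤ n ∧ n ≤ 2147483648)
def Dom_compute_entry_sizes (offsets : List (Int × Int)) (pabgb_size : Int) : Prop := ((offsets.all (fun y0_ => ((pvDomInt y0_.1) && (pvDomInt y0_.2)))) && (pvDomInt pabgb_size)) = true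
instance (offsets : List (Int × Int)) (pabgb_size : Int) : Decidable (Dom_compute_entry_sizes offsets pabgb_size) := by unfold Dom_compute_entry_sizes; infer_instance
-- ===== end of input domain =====

-- B replaces A's enumerate-and-index-ahead loop by a reverse traversal threading a running boundary (alternative decomposition, same cost); proved to return the same dict items on every input.


-- ===== PORT A =====
-- literal transliteration: sort by offset, then for i,(key,off) in enumerate(...): sizes[key] = next offset (or pabgb_size) - off
def compute_entry_sizes (offsets : List (Int × Int)) (pabgb_size : Int) : List (Int × Int) :=
  let sorted_items := PySem.List.sorted offsets (fun kv => kv.2) false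
  let sizes : PySem.Dict Int Int :=
    (PySem.List.enumerate sorted_items 0).foldl
      (fun sizes q =>
        if q.1 + 1 < PySem.List.len sorted_items then
          -- sorted_items[i + 1] is in range here (guarded by the if), so pyGetD is exact
          sizes.insert q.2.1 ((PySem.List.pyGetD sorted_items (q.1 + 1) ((0 : Int), (0 : Int))).2 - q.2.2)
        else
          sizes.insert q.2.1 (pabgb_size - q.2.2))
      PySem.Dict.empty
  sizes.items

-- ===== PORT B =====
-- literal transliteration of Source B: reverse traversal of the same stable sort, threading `boundary`
def compute_entry_sizes_alt (offsets : List (Int × Int)) (pabgb_size : Int) : List (Int × Int) :=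
  let sorted_items := PySem.List.sorted offsets (fun kv => kv.2) false
  let st := sorted_items.reverse.foldl
    (fun (st : Int × List (Int × Int)) kv => (kv.2, st.2 ++ [(kv.1, st.1 - kv.2)]))
    (pabgb_size, [])
  let pairs := st.2.reverse
  (PySem.Dict.ofList pairs).items

-- ===== PRECONDITION & SPEC =====
def Spec_compute_entry_sizes (offsets : List (Int × Int)) (pabgb_size : Int) (out : List (Int × Int)) : Prop := out = compute_entry_sizes_alt offsets pabgb_size
instance (offsets : List (Int × Int)) (pabgb_size : Int) (out : List (Int × Int)) : Decidable (Spec_compute_entry_sizes offsets pabgb_size out) := by unfold Spec_compute_entry_sizes; infer_instance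

-- ===== CLAIM (what is proved, stated in full; the proofs are below) =====
def Claim_equal_compute_entry_sizes : Prop := ∀ (offsets : List (Int × Int)) (pabgb_size : Int), Dom_compute_entry_sizes offsets pabgb_size → Spec_compute_entry_sizes offsets pabgb_size (compute_entry_sizes offsets pabgb_size)

-- ===== LEMMAS AND PROOFS =====

-- the common value sequence both loops produce over the sorted list
def bsizes : List (Int × Int) → Int → List (Int × Int)
  | [], _ => []
  | [a], p => [(a.1, p - a.2)]
  | a :: b :: t, p => (a.1, b.2 - a.2) :: bsizes (b :: t) p

theorem bsizes_cons (a : Int × Int) (t : List (Int × Int)) (p : Int) :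
    bsizes (a :: t) p = (a.1, (t.headD ((0 : Int), p)).2 - a.2) :: bsizes t p := by
  cases t <;> rfl

-- B's reverse fold computes (offset of the head, bsizes reversed)
theorem foldrB (s : List (Int × Int)) (p : Int) :
    s.foldr (fun kv st => (kv.2, st.2 ++ [(kv.1, st.1 - kv.2)])) (p, ([] : List (Int × Int)))
      = ((s.headD ((0 : Int), p)).2, (bsizes s p).reverse) := by
  induction s with
  | nil => rfl
  | cons a t ih => simp [ih, bsizes_cons a t p]

-- A's enumerate loop over a suffix t of s = pre ++ t inserts exactly the bsizes pairs
theorem foldA (p : Int) (s : List (Int × Int)) :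
    ∀ (t pre : List (Int × Int)) (d : PySem.Dict Int Int), s = pre ++ t →
    (PySem.List.enumerate t (pre.length : Int)).foldl
      (fun sizes q =>
        if q.1 + 1 < PySem.List.len s then
          sizes.insert q.2.1 ((PySem.List.pyGetD s (q.1 + 1) ((0 : Int), (0 : Int))).2 - q.2.2)
        else
          sizes.insert q.2.1 (p - q.2.2)) d
      = (bsizes t p).foldl (fun d kv => d.insert kv.1 kv.2) d := by
  intro t
  induction t with
  | nil => intro pre d hs; simp [PySem.List.enumerate, bsizes]
  | cons a t ih =>
    intro pre d hs
    rw [PySem.List.enumerate_cons, List.foldl_cons]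
    cases t with
    | nil =>
      have hlt : ¬ ((pre.length : Int) + 1 < PySem.List.len s) := by
        subst hs; simp [PySem.List.len_eq]
      simp only [hlt, if_false]
      simp [PySem.List.enumerate, bsizes]
    | cons b u =>
      have hlt : (pre.length : Int) + 1 < PySem.List.len s := by
        subst hs; simp [PySem.List.len_eq]
      have hget : PySem.List.pyGetD s ((pre.length : Int) + 1) ((0 : Int), (0 : Int)) = b := by
        have h2 : pre ++ a :: b :: u = (pre ++ [a]) ++ b :: u := by simp
        have h1 : ((pre.length : Int) + 1) = (((pre ++ [a]).length : Nat) : Int) := by simp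
        rw [h1, PySem.List.pyGetD_natCast, hs, h2]
        simp [List.getD]
      simp only [if_pos hlt, hget]
      have h3 : (pre.length : Int) + 1 = (((pre ++ [a]).length : Nat) : Int) := by simp
      rw [h3, ih (pre ++ [a]) _ (by simp [hs]), bsizes]
      simp

-- ===== VERDICT (by name: the statement is the Claim_ definition above) =====
theorem compute_entry_sizes_spec : Claim_equal_compute_entry_sizes := by
  intro offsets p _
  unfold Spec_compute_entry_sizes compute_entry_sizes compute_entry_sizes_alt
  set s := PySem.List.sorted offsets (fun kv => kv.2) false with hsdef
  simp only []
  rw [List.foldl_reverse]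
  have hB := foldrB s p
  simp only [hB]
  rw [List.reverse_reverse]
  have hA := foldA p s s [] PySem.Dict.empty (by simp)
  simp only [List.length_nil, Nat.cast_zero] at hA
  rw [hA]
  congr 1
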